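-- pv_equiv track=rewrite | github.com/AngEvd/SoftUni_Algorithms_with_Python_11_2024 | Recursion_And_Backtracking/nested_loops_to_recursion.py | simulate_loops
-- ===== SOURCE A (Python) =====
-- def simulate_loops(n, depth=1, current=None):
--     if current is None:
--         current = []
--     if depth > n:
--         return [current]
--     results = []
--     for i in range(1, n + 1):
--         results.extend(simulate_loops(n, depth + 1, current + [i]))
--     return results
-- ===== SOURCE B (Python) =====
-- def simulate_loops(n, depth=1, current=None):
--     if current is None:
--         current = []
--     results = [current]
--     for _ in range(depth, n + 1):
--         results = [prefix + [i] for prefix in results for i in range(1, n + 1)]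
--     return results
-- ===== Notes on version B (the rewrite author's own statement) =====
-- stated objective: alternative
-- what changed: Replaces the depth-first recursion (recursive calls extending a results list) with an iterative breadth-first level expansion: start from [current] and, once per remaining level, rebuild the whole list with a comprehension appending each value 1..n to every prefix.
import Mathlib
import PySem

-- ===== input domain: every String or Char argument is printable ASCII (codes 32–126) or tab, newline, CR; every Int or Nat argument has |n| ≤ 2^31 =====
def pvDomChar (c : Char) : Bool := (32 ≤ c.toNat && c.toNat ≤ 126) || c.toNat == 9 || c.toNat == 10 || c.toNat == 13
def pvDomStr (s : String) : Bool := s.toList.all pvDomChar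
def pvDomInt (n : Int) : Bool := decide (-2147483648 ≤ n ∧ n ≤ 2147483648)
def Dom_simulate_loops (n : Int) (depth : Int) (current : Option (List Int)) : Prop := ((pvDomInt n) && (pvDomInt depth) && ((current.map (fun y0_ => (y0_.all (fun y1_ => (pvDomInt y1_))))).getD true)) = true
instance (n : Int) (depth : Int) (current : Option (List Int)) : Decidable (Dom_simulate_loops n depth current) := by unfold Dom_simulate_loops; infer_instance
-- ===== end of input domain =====

-- B replaces A's depth-first recursion by an iterative level-by-level expansion of all
-- prefixes (same outputs and order); objective: alternative decomposition, not speed.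

-- ===== PORT A =====
-- recursive core of A (current already normalised from None to [])
def simulate_loops_rec (n : Int) (depth : Int) (current : List Int) : List (List Int) :=
  if depth > n then [current]
  else
    (PySem.List.pyRange 1 (n + 1) 1).foldl
      (fun results i => results ++ simulate_loops_rec n (depth + 1) (current ++ [i])) []
termination_by (n + 1 - depth).toNat
decreasing_by omega

def simulate_loops (n : Int) (depth : Int) (current : Option (List Int)) : List (List Int) :=
  simulate_loops_rec n depth (current.getD [])

-- ===== PORT B =====
def simulate_loops_alt (n : Int) (depth : Int) (current : Option (List Int)) : List (List Int) :=
  let cur := current.getD []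
  (PySem.List.pyRange depth (n + 1) 1).foldl
    (fun results _ =>
      results.flatMap (fun pfx => (PySem.List.pyRange 1 (n + 1) 1).map (fun i => pfx ++ [i])))
    [cur]

-- ===== PRECONDITION & SPEC =====
-- Pre_ excludes only the deep-recursion inputs with positive n and n - depth > 900:
-- Python A's recursion there is about n - depth frames deep, so it raises RecursionError
-- once that passes the interpreter's recursion limit, which depends on the configured
-- limit and the caller's own stack depth (and for n of at least 2 such inputs also have
-- an astronomically large output, so A cannot feasibly return); on excluded inputs where
-- a run of A still returns, B returns the identical value.
def Pre_simulate_loops (n : Int) (depth : Int) (current : Option (List Int)) : Prop :=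
  n ≤ 0 ∨ n < depth ∨ n - depth ≤ 900
instance (n : Int) (depth : Int) (current : Option (List Int)) : Decidable (Pre_simulate_loops n depth current) := by unfold Pre_simulate_loops; infer_instance

def pvWitness_simulate_loops : Int × Int × Option (List Int) := (2, 1, some [5])

def Spec_simulate_loops (n : Int) (depth : Int) (current : Option (List Int)) (out : List (List Int)) : Prop := out = simulate_loops_alt n depth current
instance (n : Int) (depth : Int) (current : Option (List Int)) (out : List (List Int)) : Decidable (Spec_simulate_loops n depth current out) := by unfold Spec_simulate_loops; infer_instance

-- ===== CLAIM (what is proved, stated in full; the proofs are below) =====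
def Claim_equal_simulate_loops : Prop := ∀ (n : Int) (depth : Int) (current : Option (List Int)), Dom_simulate_loops n depth current → Pre_simulate_loops n depth current → Spec_simulate_loops n depth current (simulate_loops n depth current)

-- ===== LEMMAS AND PROOFS =====

-- A's loop body 'results.extend(recursive call)' as a flatMap
theorem simulate_loops_rec_of_le (n depth : Int) (current : List Int) (h : ¬ depth > n) :
    simulate_loops_rec n depth current
      = (PySem.List.pyRange 1 (n + 1) 1).flatMap
          (fun i => simulate_loops_rec n (depth + 1) (current ++ [i])) := by
  rw [simulate_loops_rec, if_neg h, PySem.List.foldl_append_eq_flatMap, List.nil_append]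

-- B's fold over the remaining levels, started from any list of prefixes, equals the
-- concatenation of A's recursion applied to each prefix.
theorem level_fold_eq (k : Nat) : ∀ (n depth : Int), (n + 1 - depth).toNat = k →
    ∀ (rs : List (List Int)),
    (PySem.List.pyRange depth (n + 1) 1).foldl
      (fun results _ =>
        results.flatMap (fun pfx => (PySem.List.pyRange 1 (n + 1) 1).map (fun i => pfx ++ [i])))
      rs
      = rs.flatMap (fun c => simulate_loops_rec n depth c) := by
  induction k with
  | zero =>
    intro n depth hk rs
    rw [PySem.List.pyRange_one_eq_nil (a := depth) (b := n + 1) (by omega)]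
    have hgt : depth > n := by omega
    simp only [List.foldl_nil]
    have : ∀ c, simulate_loops_rec n depth c = [c] := by
      intro c; rw [simulate_loops_rec, if_pos hgt]
    simp [this]
  | succ k ih =>
    intro n depth hk rs
    have hle : ¬ depth > n := by omega
    rw [PySem.List.pyRange_one_cons (a := depth) (b := n + 1) (by omega)]
    simp only [List.foldl_cons]
    rw [ih n (depth + 1) (by omega)]
    simp only [List.flatMap_assoc, List.flatMap_map]
    refine List.flatMap_congr ?_
    intro c _
    rw [simulate_loops_rec_of_le n depth c hle]

-- ===== VERDICT (by name: the statement is the Claim_ definition above) =====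
theorem simulate_loops_spec : Claim_equal_simulate_loops := by
  intro n depth current _ _
  unfold Spec_simulate_loops simulate_loops simulate_loops_alt
  rw [level_fold_eq (n + 1 - depth).toNat n depth rfl [current.getD []]]
  simp
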